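-- pv_equiv track=rewrite | github.com/morningred88/-data-structure-algorithms-in-python | EPI/ch5v_boolean_ordering_partition.py | rearrange_boolean_backward
-- ===== SOURCE A (Python) =====
-- from typing import List
--
-- def rearrange_boolean_backward(A:List[bool]) -> List:
--
--     # Initialize the placement position (index) of the 2 subarrays
--     false, true = len(A) - 1, len(A) - 1
--     for i in reversed(range(0, len(A))):
--         if not A[i]:
--             false -= 1
--         else:
--             A[true], A[false] = A[false], A[true]
--             false, true = false - 1, true - 1
--
--     return A
-- ===== SOURCE B (Python) =====
-- from typing import List
--
-- def rearrange_boolean_backward(A: List[bool]) -> List: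
--     k = A.count(False)
--     A[:] = [False] * k + [True] * (len(A) - k)
--     return A
-- ===== Notes on version B (the rewrite author's own statement) =====
-- stated objective: simpler
-- what changed: Replaces the backward two-index swap loop with a single count of the False elements followed by a bulk fill (falses then trues) written back in place via slice assignment; the bulk fill avoids per-element index arithmetic and swapping.
import Mathlib
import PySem

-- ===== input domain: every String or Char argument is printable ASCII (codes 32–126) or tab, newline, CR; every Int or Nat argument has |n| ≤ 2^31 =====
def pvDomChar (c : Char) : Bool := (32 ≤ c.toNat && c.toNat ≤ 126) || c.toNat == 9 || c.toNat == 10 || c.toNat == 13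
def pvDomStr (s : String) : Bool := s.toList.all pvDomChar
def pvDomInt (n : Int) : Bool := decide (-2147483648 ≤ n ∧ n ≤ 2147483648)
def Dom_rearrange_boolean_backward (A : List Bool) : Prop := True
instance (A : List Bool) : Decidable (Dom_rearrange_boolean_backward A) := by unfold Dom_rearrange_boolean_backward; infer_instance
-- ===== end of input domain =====

-- B replaces A's backward two-index swap loop by counting the falses once and filling the
-- result (falses then trues) in bulk; objective: simpler. Both Pythons mutate the argument
-- list in place and return it; the theorems below are about the return value.

-- ===== PORT A =====
-- loop body of A with state (A, false, true); in 'A[true], A[false] = A[false], A[true]'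
-- the right-hand side is evaluated first, then A[true] is assigned, then A[false]
def pvStepA (st : List Bool × Int × Int) (i : Int) : List Bool × Int × Int :=
  match st with
  | (L, f, t) =>
    if !(PySem.List.pyGetD L i false) then (L, f - 1, t)
    else
      let x := PySem.List.pyGetD L f false
      let y := PySem.List.pyGetD L t false
      (PySem.List.pySetD (PySem.List.pySetD L t x) f y, f - 1, t - 1)

-- false, true = len(A) - 1, len(A) - 1; for i in reversed(range(0, len(A))): …; return A
def rearrange_boolean_backward (A : List Bool) : List Bool :=
  (((PySem.List.pyRange 0 (A.length : Int) 1).reverse).foldl pvStepA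
    (A, (A.length : Int) - 1, (A.length : Int) - 1)).1

-- ===== PORT B =====
-- k = A.count(False); A[:] = [False]*k + [True]*(len(A)-k); return A
def rearrange_boolean_backward_alt (A : List Bool) : List Bool :=
  let k := PySem.List.count A false
  List.replicate k false ++ List.replicate (A.length - k) true

-- ===== PRECONDITION & SPEC =====
def Spec_rearrange_boolean_backward (A : List Bool) (out : List Bool) : Prop := out = rearrange_boolean_backward_alt A
instance (A : List Bool) (out : List Bool) : Decidable (Spec_rearrange_boolean_backward A out) := by unfold Spec_rearrange_boolean_backward; infer_instance

-- ===== CLAIM (what is proved, stated in full; the proofs are below) =====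
def Claim_equal_rearrange_boolean_backward : Prop := ∀ (A : List Bool), Dom_rearrange_boolean_backward A → Spec_rearrange_boolean_backward A (rearrange_boolean_backward A)

-- ===== LEMMAS AND PROOFS =====

lemma pvGetD_len_append {α : Type} [Inhabited α] (xs zs : List α) (y d : α) :
    (xs ++ y :: zs).getD xs.length d = y := by
  induction xs with
  | nil => rfl
  | cons a xs ih => simpa using ih

lemma pvSet_len_append {α : Type} (xs zs : List α) (y v : α) :
    (xs ++ y :: zs).set xs.length v = xs ++ v :: zs := by
  induction xs with
  | nil => rfl
  | cons a xs ih => simpa using ih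

lemma pvCount_false_add_true (A : List Bool) :
    A.count false + A.count true = A.length := by
  induction A with
  | nil => rfl
  | cons a l ih => cases a <;> simp [List.count_cons] <;> omega

-- one iteration of A's loop at i = |P|, on a state whose suffix is already partitioned:
-- a false element only moves the false pointer
lemma pvStep_false (P : List Bool) (cf ct : Nat) :
    pvStepA (P ++ false :: (List.replicate cf false ++ List.replicate ct true),
      (P.length : Int), (P.length : Int) + (cf : Int)) ((P.length : Int))
    = (P ++ List.replicate (cf + 1) false ++ List.replicate ct true,
      (P.length : Int) - 1, ((P.length : Int) - 1) + ((cf + 1 : Nat) : Int)) := by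
  simp [pvStepA, pvGetD_len_append, List.replicate_succ]

-- a true element is swapped with the last false of the partitioned suffix
lemma pvStep_true (P : List Bool) (cf ct : Nat) :
    pvStepA (P ++ true :: (List.replicate cf false ++ List.replicate ct true),
      (P.length : Int), (P.length : Int) + (cf : Int)) ((P.length : Int))
    = (P ++ List.replicate cf false ++ List.replicate (ct + 1) true,
      (P.length : Int) - 1, ((P.length : Int) - 1) + (cf : Int)) := by
  cases cf with
  | zero =>
      simp [pvStepA, pvGetD_len_append, pvSet_len_append, List.replicate_succ]
  | succ c =>
      have hidx : (P.length : Int) + ((c + 1 : Nat) : Int) = ((P.length + (c + 1) : Nat) : Int) := by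
        push_cast; ring
      rw [hidx]
      simp only [pvStepA, PySem.List.pyGetD_natCast, PySem.List.pySetD_natCast,
        pvGetD_len_append, Bool.not_true]
      rw [if_neg (by simp)]
      have e1 : P ++ true :: (List.replicate (c + 1) false ++ List.replicate ct true)
          = (P ++ true :: List.replicate c false) ++ false :: List.replicate ct true := by
        simp [List.replicate_succ' (n := c)]
      have hlen : P.length + (c + 1) = (P ++ true :: List.replicate c false).length := by
        simp
      rw [e1, hlen, pvGetD_len_append, pvSet_len_append]
      have e2 : (P ++ true :: List.replicate c false) ++ true :: List.replicate ct true
          = P ++ true :: (List.replicate c false ++ true :: List.replicate ct true) := by simp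
      rw [e2, pvSet_len_append]
      refine Prod.ext ?_ (Prod.ext ?_ ?_) <;>
        simp [List.replicate_succ] <;> omega

-- invariant of A's loop: after processing indices m…n-1 the untouched prefix A[0:m] is
-- followed by the partitioned (falses-then-trues) rearrangement of the original suffix
lemma pvLoopInv (A : List Bool) :
    ∀ (m cf ct : Nat), m + cf + ct = A.length →
      ((List.range m).reverse.map (fun k => ((k : Nat) : Int))).foldl pvStepA
        (A.take m ++ List.replicate cf false ++ List.replicate ct true,
          (m : Int) - 1, (m : Int) - 1 + (cf : Int))
      = (List.replicate (cf + (A.take m).count false) false ++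
           List.replicate (ct + (A.take m).count true) true,
          -1, (cf : Int) + ((A.take m).count false : Int) - 1) := by
  intro m
  induction m with
  | zero =>
      intro cf ct h
      refine Prod.ext ?_ (Prod.ext ?_ ?_) <;> simp <;> omega
  | succ m ih =>
      intro cf ct h
      have hm : m < A.length := by omega
      have hml : (A.take m).length = m := by simp; omega
      have htk : A.take (m + 1) = A.take m ++ [A[m]] := by
        rw [List.take_succ]; simp [List.getElem?_eq_getElem hm]
      have hf : ((m + 1 : Nat) : Int) - 1 = ((A.take m).length : Int) := by
        rw [hml]; push_cast; ring
      have hi : ((m : Nat) : Int) = (((A.take m).length : Nat) : Int) := by rw [hml]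
      rw [List.range_succ, List.reverse_append, List.map_append]
      simp only [List.reverse_singleton, List.map_cons, List.map_nil, List.singleton_append,
        List.foldl_cons]
      have hstate : A.take (m + 1) ++ List.replicate cf false ++ List.replicate ct true
          = A.take m ++ A[m] :: (List.replicate cf false ++ List.replicate ct true) := by
        rw [htk, List.append_assoc, List.append_assoc, List.singleton_append]
      rw [hstate, hf, hi]
      cases hb : A[m] with
      | false =>
          rw [pvStep_false]
          have := ih (cf + 1) ct (by omega)
          rw [hml, this]
          have hc : (A.take (m+1)).count false = (A.take m).count false + 1 := by
            rw [htk]; simp [hb]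
          have hc2 : (A.take (m+1)).count true = (A.take m).count true := by
            rw [htk]; simp [hb]
          refine Prod.ext ?_ (Prod.ext ?_ ?_) <;> simp [hc, hc2] <;> try omega
      | true =>
          rw [pvStep_true]
          have := ih cf (ct + 1) (by omega)
          rw [hml, this]
          have hc : (A.take (m+1)).count false = (A.take m).count false := by
            rw [htk]; simp [hb]
          have hc2 : (A.take (m+1)).count true = (A.take m).count true + 1 := by
            rw [htk]; simp [hb]
          refine Prod.ext ?_ (Prod.ext ?_ ?_) <;> simp [hc, hc2] <;> try omega

-- ===== VERDICT (by name: the statement is the Claim_ definition above) =====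
theorem rearrange_boolean_backward_spec : Claim_equal_rearrange_boolean_backward := by
  intro A _
  show rearrange_boolean_backward A = rearrange_boolean_backward_alt A
  unfold rearrange_boolean_backward rearrange_boolean_backward_alt
  have hr : PySem.List.pyRange 0 (A.length : Int) 1
      = (List.range A.length).map (fun k => ((k : Nat) : Int)) := by
    simp [PySem.List.pyRange_zero_natCast]
  have hinit : (A, (A.length : Int) - 1, (A.length : Int) - 1)
      = (A.take A.length ++ List.replicate 0 false ++ List.replicate 0 true,
         ((A.length : Nat) : Int) - 1, ((A.length : Nat) : Int) - 1 + ((0 : Nat) : Int)) := by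
    simp
  rw [hr, ← List.map_reverse, hinit, pvLoopInv A A.length 0 0 (by omega)]
  simp [PySem.List.count, List.take_length]
  have := pvCount_false_add_true A
  omega
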